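-- pv_equiv track=rewrite | github.com/davidmcdonald13/advent-of-code | aoc2015/day17/eggnog.py | container_fill
-- ===== SOURCE A (Python) =====
-- def container_fill(amount, containers):
--     if amount == 0:
--         return {0: 1}
--     if not containers:
--         return dict()
--
--     not_include = container_fill(amount, containers[1:])
--     include = container_fill(amount - containers[0], containers[1:])
--
--     result = dict()
--     for key, value in not_include.items():
--         result[key] = value
--     for key, value in include.items():
--         if key + 1 in result:
--             result[key + 1] += value
--         else:
--             result[key + 1] = value
--
--     return result
-- ===== SOURCE B (Python) =====
-- def container_fill(amount, containers):
--     # Depth-first backtracking enumeration with a single shared counter dict: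
--     # at each leaf where the remaining amount hits 0, bump the count for the
--     # number of containers chosen so far (exclude branch explored first, so
--     # keys appear in the same first-occurrence order as A's dict merges).
--     result = {}
--     stack = [(amount, 0, 0)]  # (remaining, next index, containers used)
--     while stack:
--         rem, i, used = stack.pop()
--         if rem == 0:
--             result[used] = result.get(used, 0) + 1
--         elif i < len(containers):
--             # LIFO: push include branch first so the exclude branch runs first
--             stack.append((rem - containers[i], i + 1, used + 1))
--             stack.append((rem, i + 1, used))
--     return result
-- ===== Notes on version B (the rewrite author's own statement) =====
-- stated objective: alternative
-- what changed: Replaced A's recursion that builds a size-histogram dict at every node and merges/shifts child dicts with two item loops by an iterative depth-first search over an explicit stack of (remaining, index, used) frames that bumps a single shared counter dict once per successful leaf, so no intermediate dicts are built or merged.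
import Mathlib
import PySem

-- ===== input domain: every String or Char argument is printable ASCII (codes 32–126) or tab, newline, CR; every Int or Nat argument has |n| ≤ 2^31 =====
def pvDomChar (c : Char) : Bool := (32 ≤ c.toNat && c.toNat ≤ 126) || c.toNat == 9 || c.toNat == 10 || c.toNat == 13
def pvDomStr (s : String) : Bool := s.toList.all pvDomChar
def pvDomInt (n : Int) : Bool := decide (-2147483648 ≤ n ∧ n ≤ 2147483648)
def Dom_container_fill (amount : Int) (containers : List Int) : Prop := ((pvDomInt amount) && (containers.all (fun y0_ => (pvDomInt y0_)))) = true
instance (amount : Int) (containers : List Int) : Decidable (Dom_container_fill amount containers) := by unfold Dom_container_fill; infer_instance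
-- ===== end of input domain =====

-- B replaces A's per-node histogram dicts and dict merging by an iterative
-- stack-based depth-first search bumping one shared counter dict at the leaves.

-- ===== PORT A =====
def container_fill_rec (amount : Int) (containers : List Int) : PySem.Dict Int Int :=
  if amount = 0 then PySem.Dict.ofList [(0, 1)]
  else
    match containers with
    | [] => PySem.Dict.empty
    | c :: rest =>
      let not_include := container_fill_rec amount rest
      let include_ := container_fill_rec (amount - c) rest
      let result := not_include.items.foldl
        (fun (r : PySem.Dict Int Int) kv => r.insert kv.1 kv.2) PySem.Dict.empty
      let result := include_.items.foldl
        (fun (r : PySem.Dict Int Int) kv =>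
          if r.contains (kv.1 + 1) then r.insert (kv.1 + 1) (r.getD (kv.1 + 1) 0 + kv.2)
          else r.insert (kv.1 + 1) kv.2) result
      result

def container_fill (amount : Int) (containers : List Int) : List (Int × Int) :=
  (container_fill_rec amount containers).items

-- ===== PORT B =====
-- The while loop of Source B; a frame (rem, i, used) is represented as
-- (rem, containers[i:], used) so the loop recurses structurally on the suffix
-- (popping containers[i] = taking the head). Head of the list = top of stack.
def cfLoop (stack : List (Int × List Int × Int)) (res : PySem.Dict Int Int) :
    PySem.Dict Int Int :=
  match stack with
  | [] => res
  | (rem, cs, used) :: stk =>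
    if rem = 0 then cfLoop stk (res.insert used (res.getD used 0 + 1))
    else
      match cs with
      | [] => cfLoop stk res
      | c :: rest =>
        -- push include first, then exclude: exclude is popped first (LIFO)
        cfLoop ((rem, rest, used) :: (rem - c, rest, used + 1) :: stk) res
termination_by (stack.map (fun f => 3 ^ f.2.1.length)).sum
decreasing_by
  · simp only [List.map_cons, List.sum_cons]
    have := Nat.one_le_pow cs.length 3 (by omega)
    omega
  · simp only [List.map_cons, List.sum_cons, List.length_nil, pow_zero]
    omega
  · simp only [List.map_cons, List.sum_cons, List.length_cons, pow_succ]
    have := Nat.one_le_pow rest.length 3 (by omega)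
    omega

def container_fill_alt (amount : Int) (containers : List Int) : List (Int × Int) :=
  (cfLoop [(amount, containers, 0)] PySem.Dict.empty).items

-- ===== PRECONDITION & SPEC =====
def Spec_container_fill (amount : Int) (containers : List Int) (out : List (Int × Int)) : Prop := out = container_fill_alt amount containers
instance (amount : Int) (containers : List Int) (out : List (Int × Int)) : Decidable (Spec_container_fill amount containers out) := by unfold Spec_container_fill; infer_instance

-- ===== CLAIM (what is proved, stated in full; the proofs are below) =====
def Claim_equal_container_fill : Prop := ∀ (amount : Int) (containers : List Int), Dom_container_fill amount containers → Spec_container_fill amount containers (container_fill amount containers)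

-- ===== LEMMAS AND PROOFS =====

-- `pvBump r y v` is Python's `r[y] = r.get(y, 0) + v`.
def pvBump (r : PySem.Dict Int Int) (y v : Int) : PySem.Dict Int Int :=
  r.insert y (r.getD y 0 + v)

-- Folding `pvBump` at shifted keys over an items list (the shape both programs reduce to).
def pvMerge (res : PySem.Dict Int Int) (es : List (Int × Int)) (k : Int) :
    PySem.Dict Int Int :=
  es.foldl (fun r kv => pvBump r (kv.1 + k) kv.2) res

-- A's `if key+1 in result: += value else: = value` loop is the pvBump loop at shift 1.
theorem merge_if_eq (inc : List (Int × Int)) (r : PySem.Dict Int Int) :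
    inc.foldl (fun (r : PySem.Dict Int Int) kv =>
        if r.contains (kv.1 + 1) then r.insert (kv.1 + 1) (r.getD (kv.1 + 1) 0 + kv.2)
        else r.insert (kv.1 + 1) kv.2) r
      = pvMerge r inc 1 := by
  induction inc generalizing r with
  | nil => rfl
  | cons kv tl ih =>
    simp only [List.foldl_cons, pvMerge, pvBump] at *
    rw [← ih]
    by_cases h : r.contains (kv.1 + 1) = true
    · rw [if_pos h]
    · rw [if_neg h, PySem.Dict.getD_of_not_contains _ _ (by simpa using h), zero_add]

-- A's first loop (`result[key] = value` from an empty dict) is a copy.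
theorem copy_eq (d : PySem.Dict Int Int) (hnd : d.keys.Nodup) :
    d.items.foldl (fun (r : PySem.Dict Int Int) kv => r.insert kv.1 kv.2) PySem.Dict.empty
      = d := by
  apply PySem.Dict.ext
  have h := PySem.Dict.items_foldl_insert_fresh (l := d.items) (k := Prod.fst) (v := Prod.snd)
    (d := PySem.Dict.empty)
    (by intro a _; exact PySem.Dict.contains_empty _)
    (by simpa only [PySem.Dict.keys] using hnd)
  simpa using h

-- keys stay Nodup through A's recursion.
theorem cfRec_nodup : ∀ (cs : List Int) (rem : Int),
    (container_fill_rec rem cs).keys.Nodup := by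
  intro cs
  induction cs with
  | nil =>
    intro rem
    rw [container_fill_rec.eq_def]
    by_cases h0 : rem = 0
    · rw [if_pos h0]; exact PySem.Dict.nodup_keys_ofList _
    · rw [if_neg h0]; exact PySem.Dict.nodup_keys_empty
  | cons c rest ih =>
    intro rem
    rw [container_fill_rec.eq_def]
    by_cases h0 : rem = 0
    · rw [if_pos h0]; exact PySem.Dict.nodup_keys_ofList _
    · rw [if_neg h0]
      simp only [merge_if_eq, copy_eq _ (ih rem), pvMerge, pvBump]
      exact PySem.Dict.nodup_keys_foldl_insert_key _ (fun kv : Int × Int => kv.1 + 1) _ _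
        (ih rem)

-- first-occurrence split of a Nodup-keyed items list
theorem split_first (es : List (Int × Int)) (y : Int)
    (hnd : (es.map Prod.fst).Nodup) (hm : y ∈ es.map Prod.fst) :
    ∃ p w q, es = p ++ (y, w) :: q ∧ y ∉ p.map Prod.fst ∧ y ∉ q.map Prod.fst := by
  induction es with
  | nil => simp at hm
  | cons hd tl ih =>
    simp only [List.map_cons, List.nodup_cons] at hnd
    by_cases hy : hd.1 = y
    · exact ⟨[], hd.2, tl, by simp [← hy], by simp, by rw [hy] at hnd; exact hnd.1⟩
    · have hm' : y ∈ tl.map Prod.fst := by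
        simp only [List.map_cons, List.mem_cons] at hm
        rcases hm with h | h
        · exact absurd h.symm hy
        · exact h
      obtain ⟨p, w, q, heq, hp, hq⟩ := ih hnd.2 hm'
      refine ⟨hd :: p, w, q, by rw [heq]; simp, ?_, hq⟩
      simp only [List.map_cons, List.mem_cons, not_or]
      exact ⟨Ne.symm hy, hp⟩

-- two inserts at distinct keys commute when the first key is already present
theorem insert_comm_of_contains (B : PySem.Dict Int Int) (y z a b : Int)
    (hy : B.contains y = true) (hne : z ≠ y) :
    (B.insert y a).insert z b = (B.insert z b).insert y a := by
  apply PySem.Dict.ext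
  have hyz : (B.insert z b).contains y = true := by
    rw [PySem.Dict.contains_insert]; simp [hy]
  cases hz : B.contains z with
  | false =>
    have h1 : (B.insert y a).contains z = false := by
      rw [PySem.Dict.contains_insert]; simp [hz, hne]
    rw [PySem.Dict.items_insert_of_not_contains _ _ h1,
        PySem.Dict.items_insert_of_contains _ _ hy,
        PySem.Dict.items_insert_of_contains _ _ hyz,
        PySem.Dict.items_insert_of_not_contains _ _ hz, List.map_append]
    simp [hne]
  | true =>
    have h1 : (B.insert y a).contains z = true := by
      rw [PySem.Dict.contains_insert]; simp [hz]
    rw [PySem.Dict.items_insert_of_contains _ _ h1,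
        PySem.Dict.items_insert_of_contains _ _ hy,
        PySem.Dict.items_insert_of_contains _ _ hyz,
        PySem.Dict.items_insert_of_contains _ _ hz, List.map_map, List.map_map]
    apply List.map_congr_left
    intro p _
    simp only [Function.comp_apply]
    by_cases hpy : p.1 = y
    · simp [hpy, Ne.symm hne]
    · by_cases hpz : p.1 = z
      · simp [hpz, hne]
      · simp [hpy, hpz]

-- bumping twice at the same key adds the two increments
theorem bump_bump (A : PySem.Dict Int Int) (z w v : Int) :
    pvBump A z (w + v) = pvBump (pvBump A z w) z v := by
  simp only [pvBump, PySem.Dict.getD_insert_self, PySem.Dict.insert_insert_self]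
  congr 1
  omega

-- a bump at a key already present commutes through a later pvBump fold
theorem foldl_bump_comm (q : List (Int × Int)) (k : Int) :
    ∀ (B : PySem.Dict Int Int) (z v : Int), B.contains z = true →
    q.foldl (fun r kv => pvBump r (kv.1 + k) kv.2) (pvBump B z v)
      = pvBump (q.foldl (fun r kv => pvBump r (kv.1 + k) kv.2) B) z v := by
  induction q with
  | nil => intro B z v _; rfl
  | cons kv tl ih =>
    intro B z v hB
    simp only [List.foldl_cons]
    have hstep : pvBump (pvBump B z v) (kv.1 + k) kv.2
        = pvBump (pvBump B (kv.1 + k) kv.2) z v := by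
      by_cases he : kv.1 + k = z
      · subst he
        simp only [pvBump, PySem.Dict.getD_insert_self, PySem.Dict.insert_insert_self]
        congr 1
        omega
      · simp only [pvBump]
        rw [PySem.Dict.getD_insert_of_ne _ _ _ he,
            PySem.Dict.getD_insert_of_ne _ _ _ (Ne.symm he)]
        exact insert_comm_of_contains B z (kv.1 + k) _ _ hB he
    rw [hstep, ih _ z v (by rw [pvBump, PySem.Dict.contains_insert]; simp [hB])]

-- merging through a single bump of the merged dict
theorem merge_bump (d : PySem.Dict Int Int) (hnd : d.keys.Nodup)
    (res : PySem.Dict Int Int) (k y v : Int) :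
    pvMerge res (pvBump d y v).items k = pvBump (pvMerge res d.items k) (y + k) v := by
  cases hc : d.contains y with
  | false =>
    have hb : pvBump d y v = d.insert y (0 + v) := by
      rw [pvBump, PySem.Dict.getD_of_not_contains _ _ hc]
    rw [hb, PySem.Dict.items_insert_of_not_contains _ _ hc]
    simp only [pvMerge, List.foldl_append, List.foldl_cons, List.foldl_nil]
    simp only [pvBump]
    congr 1
    omega
  | true =>
    have hmem : y ∈ d.items.map Prod.fst := by
      have := (PySem.Dict.contains_iff_mem_keys d y).1 hc
      simpa only [PySem.Dict.keys] using this
    have hnd' : (d.items.map Prod.fst).Nodup := by simpa only [PySem.Dict.keys] using hnd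
    obtain ⟨p, w, q, hsplit, hp, hq⟩ := split_first d.items y hnd' hmem
    have hw : d.getD y 0 = w :=
      PySem.Dict.getD_of_mem_items _ (by rw [hsplit]; simp) hnd 0
    have hpmap : ∀ pr ∈ p,
        (if (pr.1 == y) = true then (y, d.getD y 0 + v) else pr) = pr := by
      intro pr hpr
      have hne : pr.1 ≠ y := fun h => hp (h ▸ List.mem_map_of_mem hpr)
      simp [hne]
    have hqmap : ∀ pr ∈ q,
        (if (pr.1 == y) = true then (y, d.getD y 0 + v) else pr) = pr := by
      intro pr hpr
      have hne : pr.1 ≠ y := fun h => hq (h ▸ List.mem_map_of_mem hpr)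
      simp [hne]
    have hitems : (pvBump d y v).items = p ++ (y, w + v) :: q := by
      rw [pvBump, PySem.Dict.items_insert_of_contains _ _ hc, hsplit,
          List.map_append, List.map_cons, List.map_congr_left hpmap,
          List.map_congr_left hqmap]
      simp [hw]
    rw [hitems, hsplit]
    simp only [pvMerge, List.foldl_append, List.foldl_cons]
    rw [bump_bump]
    rw [foldl_bump_comm q k _ (y + k) v
      (by rw [pvBump, PySem.Dict.contains_insert]; simp)]

-- composing two merges: merging a dict that was itself extended by a shifted bump fold
theorem merge_comp (es : List (Int × Int)) :
    ∀ (d : PySem.Dict Int Int), d.keys.Nodup → ∀ (res : PySem.Dict Int Int) (k s : Int),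
    pvMerge res (es.foldl (fun r kv => pvBump r (kv.1 + s) kv.2) d).items k
      = es.foldl (fun r kv => pvBump r (kv.1 + (s + k)) kv.2) (pvMerge res d.items k) := by
  induction es with
  | nil => intro d _ res k s; rfl
  | cons kv tl ih =>
    intro d hnd res k s
    simp only [List.foldl_cons]
    rw [ih (pvBump d (kv.1 + s) kv.2) (PySem.Dict.nodup_keys_insert _ _ _ hnd),
        merge_bump d hnd res k (kv.1 + s) kv.2]
    congr 2
    omega

-- merging into an empty dict with shift 0 rebuilds the dict
theorem merge_zero (es : List (Int × Int)) :
    ∀ (r : PySem.Dict Int Int), (es.map Prod.fst).Nodup →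
    (∀ p ∈ es, r.contains p.1 = false) →
    pvMerge r es 0 = PySem.Dict.mk (r.items ++ es) := by
  induction es with
  | nil =>
    intro r _ _
    simp only [pvMerge, List.foldl_nil, List.append_nil]
  | cons kv tl ih =>
    intro r hnd hfresh
    simp only [List.map_cons, List.nodup_cons] at hnd
    have hkv : r.contains kv.1 = false := hfresh kv (by simp)
    have hstep : pvBump r (kv.1 + 0) kv.2 = r.insert kv.1 kv.2 := by
      rw [pvBump, show kv.1 + 0 = kv.1 from by omega,
          PySem.Dict.getD_of_not_contains _ _ hkv, zero_add]
    have hfresh' : ∀ p ∈ tl, (r.insert kv.1 kv.2).contains p.1 = false := by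
      intro p hp
      rw [PySem.Dict.contains_insert]
      have h1 : p.1 ≠ kv.1 := fun h => hnd.1 (h ▸ List.mem_map_of_mem hp)
      simp [h1, hfresh p (List.mem_cons_of_mem _ hp)]
    simp only [pvMerge, List.foldl_cons]
    rw [hstep, show List.foldl (fun r kv => pvBump r (kv.1 + 0) kv.2) (r.insert kv.1 kv.2) tl
          = pvMerge (r.insert kv.1 kv.2) tl 0 from rfl,
        ih (r.insert kv.1 kv.2) hnd.2 hfresh',
        PySem.Dict.items_insert_of_not_contains _ _ hkv]
    simp

-- unfolding lemmas for cfLoop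
theorem cfLoop_zero (rem : Int) (cs : List Int) (used : Int) (stk) (res)
    (h0 : rem = 0) :
    cfLoop ((rem, cs, used) :: stk) res
      = cfLoop stk (res.insert used (res.getD used 0 + 1)) := by
  rw [cfLoop.eq_def]; simp [h0]

theorem cfLoop_nil (rem used : Int) (stk) (res) (h0 : ¬ rem = 0) :
    cfLoop ((rem, ([] : List Int), used) :: stk) res = cfLoop stk res := by
  rw [cfLoop.eq_def]; simp [h0]

theorem cfLoop_cons (rem c used : Int) (rest : List Int) (stk) (res) (h0 : ¬ rem = 0) :
    cfLoop ((rem, c :: rest, used) :: stk) res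
      = cfLoop ((rem, rest, used) :: (rem - c, rest, used + 1) :: stk) res := by
  rw [cfLoop.eq_def]; simp [h0]

-- processing one frame merges A's histogram for that frame (shifted by `used`) into res
theorem cfLoop_frame : ∀ (cs : List Int) (rem k : Int) (stk : List (Int × List Int × Int))
    (res : PySem.Dict Int Int),
    cfLoop ((rem, cs, k) :: stk) res
      = cfLoop stk (pvMerge res (container_fill_rec rem cs).items k) := by
  intro cs
  induction cs with
  | nil =>
    intro rem k stk res
    by_cases h0 : rem = 0
    · rw [cfLoop_zero _ _ _ _ _ h0, container_fill_rec.eq_def, if_pos h0]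
      congr 1
      rw [show (PySem.Dict.ofList [((0 : Int), (1 : Int))]).items = [(0, 1)] from rfl]
      simp [pvMerge, pvBump]
    · rw [cfLoop_nil _ _ _ _ h0, container_fill_rec.eq_def, if_neg h0]
      rfl
  | cons c rest ih =>
    intro rem k stk res
    by_cases h0 : rem = 0
    · rw [cfLoop_zero _ _ _ _ _ h0, container_fill_rec.eq_def, if_pos h0]
      congr 1
      rw [show (PySem.Dict.ofList [((0 : Int), (1 : Int))]).items = [(0, 1)] from rfl]
      simp [pvMerge, pvBump]
    · rw [cfLoop_cons _ _ _ _ _ _ h0, ih rem k, ih (rem - c) (k + 1)]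
      congr 1
      conv_rhs => rw [container_fill_rec.eq_def]
      rw [if_neg h0]
      simp only [merge_if_eq, copy_eq _ (cfRec_nodup rest rem)]
      rw [show pvMerge (container_fill_rec rem rest)
            (container_fill_rec (rem - c) rest).items 1
          = (container_fill_rec (rem - c) rest).items.foldl
              (fun r kv => pvBump r (kv.1 + 1) kv.2) (container_fill_rec rem rest) from rfl,
        merge_comp _ _ (cfRec_nodup rest rem) res k 1,
        show (1 : Int) + k = k + 1 from by omega]
      rfl

-- ===== VERDICT (by name: the statement is the Claim_ definition above) =====
theorem container_fill_spec : Claim_equal_container_fill := by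
  intro amount containers _
  unfold Spec_container_fill container_fill container_fill_alt
  rw [cfLoop_frame containers amount 0 [] PySem.Dict.empty]
  rw [show ∀ r, cfLoop [] r = r from fun r => by rw [cfLoop.eq_def]]
  rw [merge_zero _ PySem.Dict.empty
    (by simpa only [PySem.Dict.keys] using cfRec_nodup containers amount)
    (by intro p _; exact PySem.Dict.contains_empty _)]
  rfl
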